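-- pv_equiv track=rewrite | github.com/fa7271/Python-Algorithm | bs/DFS, BFS/9079.py | bfs
-- ===== SOURCE A (Python) =====
-- from collections import deque
--
-- move = [(0, 1, 2), (3, 4, 5), (6, 7, 8), (0, 3, 6), (1, 4, 7), (2, 5, 8), (0, 4, 8), (2, 4, 6)]
--
-- def flip(change_arr, new_arr):
--     for i in change_arr:
--         new_arr[i] = '0' if new_arr[i] == '1' else '1'
--     return new_arr
--
-- def bfs(numbers):
--     visited = [False] * 512
--     visited[int(''.join(numbers), 2)] = True
--
--     Q = deque([(int(''.join(numbers), 2), 0)])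
--     while Q:
--         n_num, count = Q.popleft()
--         if n_num == 0 or n_num == 511:
--             return count
--
--         for number in move:
--             n_numbers = flip(number, list(bin(n_num)[2:].zfill(9)))
--             n_num_bin = int(''.join(n_numbers), 2)
--             if not visited[n_num_bin]:
--                 visited[n_num_bin] = True
--                 Q.append((int(''.join(n_numbers), 2), count + 1))
--
--     return -1
-- ===== SOURCE B (Python) =====
-- # B: no search at all — the 8 moves are involutive commuting XOR masks, so the
-- # reachable states are exactly start XOR (subset of masks) and the minimal number
-- # of moves is the minimal subset size; enumerate the 256 subsets directly.
-- def bfs(numbers):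
--     masks = [448, 56, 7, 292, 146, 73, 273, 84]
--     start = int(''.join(numbers), 2)
--     best = -1
--     for s in range(256):
--         x = 0
--         k = 0
--         for i in range(8):
--             if (s >> i) & 1:
--                 x ^= masks[i]
--                 k += 1
--         if x == start or x == start ^ 511:
--             if best < 0 or k < best:
--                 best = k
--     return best
-- ===== Notes on version B (the rewrite author's own statement) =====
-- stated objective: alternative
-- what changed: A's BFS over the 512-state graph (deque, visited list, string encode/flip/reparse per edge) is replaced by a closed algebraic enumeration with no search, queue, frontier or visited set: since the 8 moves are involutive commuting XOR masks, any move sequence acts as the XOR of a subset of masks, so B scans the 256 subsets once, keeps the smallest subset whose XOR equals start or start^511, and returns -1 if none does.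
import Mathlib
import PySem

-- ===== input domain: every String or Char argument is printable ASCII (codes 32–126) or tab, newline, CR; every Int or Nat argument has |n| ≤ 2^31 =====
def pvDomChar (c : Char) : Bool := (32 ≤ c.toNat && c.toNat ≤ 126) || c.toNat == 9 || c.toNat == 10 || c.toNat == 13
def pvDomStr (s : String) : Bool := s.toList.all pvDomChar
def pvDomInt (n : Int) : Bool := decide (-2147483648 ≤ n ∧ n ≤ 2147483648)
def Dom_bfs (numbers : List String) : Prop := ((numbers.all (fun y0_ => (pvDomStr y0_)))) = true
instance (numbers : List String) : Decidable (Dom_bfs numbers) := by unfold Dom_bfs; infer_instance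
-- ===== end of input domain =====

-- B replaces A's BFS (deque, visited list, string flips) by a searchless algebraic
-- scan: the moves are involutive commuting XOR masks, so B enumerates the 256 mask
-- subsets once and returns the smallest subset whose XOR reaches all-0 or all-1.

-- ===== PORT A =====
-- move = [(0,1,2), (3,4,5), …]
def pvMove : List (List Nat) := [[0,1,2],[3,4,5],[6,7,8],[0,3,6],[1,4,7],[2,5,8],[0,4,8],[2,4,6]]

-- flip(change_arr, new_arr): every call bfs makes passes indices 0..8 into a 9-cell
-- list, so plain List.set / List.getD is exact here (no negative or out-of-range index).
def pvFlip (change : List Nat) (arr : List Char) : List Char :=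
  change.foldl (fun a i => a.set i (if a.getD i ' ' = '1' then '0' else '1')) arr

-- list(bin(n_num)[2:].zfill(9))   (s[2:] on a string is drop 2)
def pvBin9 (n : Int) : List Char :=
  PySem.Chars.zfill ((PySem.Int.toBinChars0b n).drop 2) 9

-- the body of A's `for number in move` loop
def pvStepA (n count : Int) (st : List Bool × List (Int × Int)) (number : List Nat) :
    List Bool × List (Int × Int) :=
  let nChars := pvFlip number (pvBin9 n)
  -- int(''.join(n_numbers), 2): on every call inside Pre_ the chars are all '0'/'1', so it parses
  let nBin := (PySem.Int.ofCharsBase? nChars 2).getD 0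
  -- `not visited[n_num_bin]` / `visited[n_num_bin] = True`: the index is in [0, 512) inside Pre_
  if PySem.List.pyGetD st.1 nBin false = false then
    (st.1.set nBin.toNat true, st.2 ++ [(nBin, count + 1)])
  else st

-- the `while Q` loop; fuel 1000 exceeds the ≤ 513 dequeues that can ever happen
def pvBfsLoop : Nat → List Bool → List (Int × Int) → Int
  | _, _, [] => -1
  | 0, _, _ :: _ => -1   -- fuel never runs out on a real run
  | fuel + 1, visited, (n, count) :: rest =>
    if n = 0 ∨ n = 511 then count
    else
      let st := pvMove.foldl (pvStepA n count) (visited, rest)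
      pvBfsLoop fuel st.1 st.2

def bfs (numbers : List String) : Int :=
  match PySem.Int.ofStrBase? (PySem.Str.join "" numbers) 2 with
  | none => 0          -- Python raises ValueError here (excluded by Pre_)
  | some start =>
    if start < 0 ∨ 511 < start then 0   -- Python raises IndexError/ValueError here (excluded by Pre_)
    else pvBfsLoop 1000 ((List.replicate 512 false).set start.toNat true) [(start, 0)]

-- ===== PORT B =====
def pvMasks : List Nat := [448, 56, 7, 292, 146, 73, 273, 84]

-- B's inner `for i in range(8)` loop: (x, k) after XOR-ing the masks picked by s
def pvSubset (s : Nat) : Nat × Nat :=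
  (List.range 8).foldl (fun xk i =>
    if (s >>> i) % 2 = 1 then (xk.1 ^^^ pvMasks.getD i 0, xk.2 + 1) else xk) (0, 0)

-- B's outer `for s in range(256)` loop over the running best
def pvScan (start : Nat) : Int :=
  (List.range 256).foldl (fun best s =>
    let xk := pvSubset s
    if xk.1 = start ∨ xk.1 = start ^^^ 511 then
      if best < 0 ∨ (xk.2 : Int) < best then (xk.2 : Int) else best
    else best) (-1)

def bfs_alt (numbers : List String) : Int :=
  match PySem.Int.ofStrBase? (PySem.Str.join "" numbers) 2 with
  | none => 0          -- B's Python raises ValueError here too (excluded by Pre_)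
  | some start =>
    -- for start outside [0,511] no 9-bit subset XOR can equal start or start^511,
    -- so B's Python returns -1 there; written as a guard since the port scans Nats
    if start < 0 ∨ 511 < start then -1
    else pvScan start.toNat

-- ===== PRECONDITION & SPEC =====
-- Pre_: the joined string parses as a base-2 int in [0, 511] — exactly the inputs on which
-- A returns (otherwise A raises: ValueError on the parse, IndexError for a value ≥ 512,
-- ValueError inside the loop for a negative value).
def Pre_bfs (numbers : List String) : Prop :=
  (PySem.Int.ofStrBase? (PySem.Str.join "" numbers) 2).isSome = true ∧
  0 ≤ (PySem.Int.ofStrBase? (PySem.Str.join "" numbers) 2).getD 0 ∧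
  (PySem.Int.ofStrBase? (PySem.Str.join "" numbers) 2).getD 0 ≤ 511

instance (numbers : List String) : Decidable (Pre_bfs numbers) := by unfold Pre_bfs; infer_instance

def pvWitness_bfs : List String := ["101", "110", "011"]

def Spec_bfs (numbers : List String) (out : Int) : Prop := out = bfs_alt numbers
instance (numbers : List String) (out : Int) : Decidable (Spec_bfs numbers out) := by unfold Spec_bfs; infer_instance

-- ===== CLAIM (what is proved, stated in full; the proofs are below) =====
def Claim_equal_bfs : Prop := ∀ (numbers : List String), Dom_bfs numbers → Pre_bfs numbers → Spec_bfs numbers (bfs numbers)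

-- ===== LEMMAS AND PROOFS =====
set_option maxRecDepth 8192

-- Proof plan: rewrite A's string-based BFS into an integer-state, level-synchronous
-- BFS (pvAltLoop below, a proof device), then close the gap to B's subset scan by
-- kernel evaluation over all 512 possible start states.

-- proof-side level BFS on Nat states with a bitmask visited set
def pvStepB (n : Nat) (st : Nat × List Nat) (m : Nat) : Nat × List Nat :=
  if (st.1 >>> (n ^^^ m)) % 2 = 0 then (st.1 ||| (1 <<< (n ^^^ m)), st.2 ++ [n ^^^ m]) else st
def pvExpand (st : Nat × List Nat) (n : Nat) : Nat × List Nat :=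
  pvMasks.foldl (pvStepB n) st
def pvAltLoop : Nat → Nat → List Nat → Nat → Int
  | _, _, [], _ => -1
  | 0, _, _ :: _, _ => -1
  | fuel + 1, seen, frontier, depth =>
    if frontier.any (fun n => n == 0 || n == 511) then (depth : Int)
    else
      let st := frontier.foldl pvExpand (seen, [])
      pvAltLoop fuel st.1 st.2 (depth + 1)

-- A's visited list as a function of the bitmask
def bitsL (seen : Nat) : List Bool := (List.range 512).map (fun i => seen.testBit i)
-- number of still-unvisited states (the loop measure)
def unseenN (seen : Nat) : Nat := (List.range 512).countP (fun i => !seen.testBit i)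
-- a frontier entry as A's queue entry
def pairD (d : Nat) (n : Nat) : Int × Int := ((n : Int), (d : Int))
-- the moves paired with their XOR masks
def pvMP : List (List Nat × Nat) :=
  [([0,1,2],448), ([3,4,5],56), ([6,7,8],7), ([0,3,6],292),
   ([1,4,7],146), ([2,5,8],73), ([0,4,8],273), ([2,4,6],84)]
-- the 9-bit state as its list of binary-digit characters
def charsOf (n : Nat) : List Char := (List.range 9).map (fun i => if n.testBit (8 - i) then '1' else '0')

lemma pvMP_fst : pvMP.map Prod.fst = pvMove := rfl
lemma pvMP_snd : pvMP.map Prod.snd = pvMasks := rfl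

lemma masks_lt {p : List Nat × Nat} (hp : p ∈ pvMP) : p.2 < 512 := by
  fin_cases hp <;> norm_num

lemma testBit_of_mod (s nb : Nat) : ((s >>> nb) % 2 = 0) ↔ s.testBit nb = false := by
  simp [Nat.testBit, Nat.one_and_eq_mod_two, bne]

lemma pyGetD_bitsL (seen : Nat) {i : Nat} (hi : i < 512) :
    PySem.List.pyGetD (bitsL seen) ((i : Nat) : Int) false = seen.testBit i := by
  rw [PySem.List.pyGetD_natCast]
  simp [bitsL, List.getD, hi]

lemma set_bitsL (seen : Nat) {i : Nat} (hi : i < 512) :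
    (bitsL seen).set i true = bitsL (seen ||| 1 <<< i) := by
  apply List.ext_getElem
  · simp [bitsL]
  · intro j hj hj'
    simp only [bitsL, List.length_map, List.length_range] at hj'
    simp only [List.getElem_set, bitsL, List.getElem_map, List.getElem_range,
      Nat.testBit_or, Nat.one_shiftLeft, Nat.testBit_two_pow]
    by_cases h : i = j <;> simp [h]

lemma replicate_eq_bitsL : List.replicate 512 false = bitsL 0 := by
  apply List.ext_getElem <;> simp [bitsL]

lemma unseenN_zero : unseenN 0 = 512 := by
  simp [unseenN]

lemma countP_aux (seen i : Nat) (h : seen.testBit i = false) :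
    ∀ (l : List Nat), l.Nodup → i ∈ l →
      l.countP (fun j => !(seen ||| 1 <<< i).testBit j) + 1 = l.countP (fun j => !seen.testBit j) := by
  intro l
  induction l with
  | nil => simp
  | cons a t ih =>
    intro hnd hm
    simp only [List.nodup_cons] at hnd
    have hbit : ∀ j, j ≠ i → ((seen ||| 1 <<< i).testBit j) = seen.testBit j := by
      intro j hji
      simp [Nat.testBit_or, Nat.one_shiftLeft, Ne.symm hji]
    rw [List.countP_cons, List.countP_cons]
    rcases List.mem_cons.mp hm with heq | hmt
    · subst heq
      have ht : List.countP (fun j => !(seen ||| 1 <<< i).testBit j) t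
          = List.countP (fun j => !seen.testBit j) t := by
        apply List.countP_congr
        intro j hj
        have hji : j ≠ i := fun e => hnd.1 (e ▸ hj)
        simp [hbit j hji]
      have e1 : (seen ||| 1 <<< i).testBit i = true := by
        simp [Nat.testBit_or, Nat.one_shiftLeft]
      rw [ht]
      simp [e1, h]
    · have hrec := ih hnd.2 hmt
      have ha2 : ((seen ||| 1 <<< i).testBit a) = seen.testBit a :=
        hbit a (fun e => hnd.1 (e ▸ hmt))
      rw [ha2]
      omega

lemma unseenN_or {seen i : Nat} (hi : i < 512) (h : seen.testBit i = false) :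
    unseenN (seen ||| 1 <<< i) + 1 = unseenN seen :=
  countP_aux seen i h (List.range 512) (List.nodup_range) (List.mem_range.mpr hi)

lemma xor_lt {a b : Nat} (ha : a < 512) (hb : b < 512) : a ^^^ b < 512 := by
  have h9 : (512 : Nat) = 2 ^ 9 := by norm_num
  rw [h9] at ha hb ⊢
  exact Nat.xor_lt_two_pow ha hb

lemma or_shift_lt {s i : Nat} (hs : s < 2 ^ 512) (hi : i < 512) : s ||| 1 <<< i < 2 ^ 512 := by
  apply Nat.or_lt_two_pow hs
  rw [Nat.one_shiftLeft]
  exact Nat.pow_lt_pow_right (by norm_num) hi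

-- ---- the string pipeline is XOR ----

lemma charsOf_getElem (m : Nat) {j : Nat} (hj : j < 9) :
    (charsOf m)[j]'(by simp [charsOf]; omega) = if m.testBit (8 - j) then '1' else '0' := by
  simp [charsOf]

set_option maxHeartbeats 1000000 in
lemma bin_eq_all : (List.range 512).all (fun n => pvBin9 (n : Int) == charsOf n) = true := by decide

lemma bin_eq {n : Nat} (hn : n < 512) : pvBin9 (n : Int) = charsOf n :=
  beq_iff_eq.mp (List.all_eq_true.mp bin_eq_all n (List.mem_range.mpr hn))

set_option maxHeartbeats 1000000 in
lemma parse_eq_all :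
    (List.range 512).all (fun n => PySem.Int.ofCharsBase? (charsOf n) 2 == some ((n : Nat) : Int)) = true := by
  decide

lemma parse_eq {n : Nat} (hn : n < 512) :
    PySem.Int.ofCharsBase? (charsOf n) 2 = some ((n : Nat) : Int) :=
  beq_iff_eq.mp (List.all_eq_true.mp parse_eq_all n (List.mem_range.mpr hn))

lemma setFlip (m p : Nat) (hp : p < 9) :
    (charsOf m).set p (if (charsOf m).getD p ' ' = '1' then '0' else '1')
      = charsOf (m ^^^ 1 <<< (8 - p)) := by
  have hlen : (charsOf m).length = 9 := by simp [charsOf]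
  have hgd : (charsOf m).getD p ' ' = if m.testBit (8 - p) then '1' else '0' := by
    rw [List.getD_eq_getElem (charsOf m) ' ' (by omega)]
    exact charsOf_getElem m hp
  apply List.ext_getElem
  · simp [charsOf]
  · intro j hj hj'
    have hj9 : j < 9 := by simpa [charsOf] using hj'
    rw [List.getElem_set]
    by_cases hpj : p = j
    · subst hpj
      rw [if_pos rfl, hgd, charsOf_getElem _ hp]
      have : (m ^^^ 1 <<< (8 - p)).testBit (8 - p) = !m.testBit (8 - p) := by
        simp [Nat.testBit_xor, Nat.one_shiftLeft]
      rw [this]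
      cases m.testBit (8 - p) <;> rfl
    · rw [if_neg hpj, charsOf_getElem _ hj9, charsOf_getElem _ hj9]
      have : (m ^^^ 1 <<< (8 - p)).testBit (8 - j) = m.testBit (8 - j) := by
        have hne : ¬ (8 - p = 8 - j) := by omega
        simp [Nat.testBit_xor, Nat.one_shiftLeft, hne]
      rw [this]

lemma flip_charsOf {p : List Nat × Nat} (hp : p ∈ pvMP) (n : Nat) :
    pvFlip p.1 (charsOf n) = charsOf (n ^^^ p.2) := by
  fin_cases hp <;>
    simp only [pvFlip, List.foldl_cons, List.foldl_nil] <;>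
    rw [setFlip _ _ (by norm_num), setFlip _ _ (by norm_num), setFlip _ _ (by norm_num)] <;>
    norm_num <;>
    rw [Nat.xor_assoc, Nat.xor_assoc] <;>
    congr 1

lemma pipeline {n : Nat} (hn : n < 512) {p : List Nat × Nat} (hp : p ∈ pvMP) :
    PySem.Int.ofCharsBase? (pvFlip p.1 (pvBin9 (n : Int))) 2 = some ((n ^^^ p.2 : Nat) : Int) := by
  rw [bin_eq hn, flip_charsOf hp n]
  exact parse_eq (xor_lt hn (masks_lt hp))

-- ---- one A-move step matches one mask step ----

lemma stepAB {n m : Nat} (d : Nat) (t : List Nat) (hn : n < 512) (hm : m < 512)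
    (hP : PySem.Int.ofCharsBase? (pvFlip t (pvBin9 (n : Int))) 2 = some ((n ^^^ m : Nat) : Int))
    (seen : Nat) (N : List Nat) (P : List (Int × Int)) :
    pvStepA (n : Int) (d : Int) (bitsL seen, P ++ N.map (pairD (d+1))) t
      = (bitsL (pvStepB n (seen, N) m).1, P ++ (pvStepB n (seen, N) m).2.map (pairD (d+1))) := by
  have hnb : n ^^^ m < 512 := xor_lt hn hm
  simp only [pvStepA, pvStepB, hP, Option.getD_some, pyGetD_bitsL seen hnb]
  cases hb : seen.testBit (n ^^^ m) with
  | false =>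
    have hg : (seen >>> (n ^^^ m)) % 2 = 0 := (testBit_of_mod seen (n ^^^ m)).mpr hb
    simp [hg, Int.toNat_natCast, set_bitsL seen hnb, pairD, List.append_assoc,
      Nat.cast_add, Nat.cast_one]
  | true =>
    have hg : ¬ ((seen >>> (n ^^^ m)) % 2 = 0) := by
      rw [testBit_of_mod, hb]; simp
    simp [hg]

lemma stepB_props {n : Nat} (hn : n < 512) (st : Nat × List Nat) {m : Nat} (hm : m < 512)
    (h1 : st.1 < 2 ^ 512) (h2 : ∀ x ∈ st.2, x < 512) :
    (pvStepB n st m).1 < 2 ^ 512 ∧ (∀ x ∈ (pvStepB n st m).2, x < 512) ∧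
    (pvStepB n st m).2.length + unseenN (pvStepB n st m).1 = st.2.length + unseenN st.1 := by
  have hnb : n ^^^ m < 512 := xor_lt hn hm
  unfold pvStepB
  split
  · rename_i hg
    rw [testBit_of_mod] at hg
    have hu := unseenN_or hnb hg
    refine ⟨or_shift_lt h1 hnb, ?_, ?_⟩
    · intro x hx
      rcases List.mem_append.mp hx with hx | hx
      · exact h2 x hx
      · simp at hx; omega
    · simp only [List.length_append, List.length_cons, List.length_nil]
      omega
  · exact ⟨h1, h2, rfl⟩

-- folding A's move loop = folding the mask loop (generic in the paired list)
lemma foldAB (mp : List (List Nat × Nat)) {n : Nat} (d : Nat) (hn : n < 512)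
    (hmp : ∀ p ∈ mp, p.2 < 512 ∧
      PySem.Int.ofCharsBase? (pvFlip p.1 (pvBin9 (n : Int))) 2 = some ((n ^^^ p.2 : Nat) : Int)) :
    ∀ (seen : Nat) (N : List Nat) (P : List (Int × Int)),
    (mp.map Prod.fst).foldl (pvStepA (n : Int) (d : Int)) (bitsL seen, P ++ N.map (pairD (d+1)))
      = (bitsL ((mp.map Prod.snd).foldl (pvStepB n) (seen, N)).1,
         P ++ ((mp.map Prod.snd).foldl (pvStepB n) (seen, N)).2.map (pairD (d+1))) := by
  induction mp with
  | nil => intro seen N P; rfl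
  | cons p mp' ih =>
    intro seen N P
    simp only [List.map_cons, List.foldl_cons]
    obtain ⟨hm, hP⟩ := hmp p (List.mem_cons_self ..)
    rw [stepAB d p.1 hn hm hP seen N P]
    have := ih (fun q hq => hmp q (List.mem_cons_of_mem _ hq))
      ((pvStepB n (seen, N) p.2).1) ((pvStepB n (seen, N) p.2).2) P
    simpa using this

lemma maskFold_props {n : Nat} (hn : n < 512) :
    ∀ (ms : List Nat), (∀ m ∈ ms, m < 512) → ∀ (st : Nat × List Nat),
    st.1 < 2 ^ 512 → (∀ x ∈ st.2, x < 512) →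
    (ms.foldl (pvStepB n) st).1 < 2 ^ 512 ∧ (∀ x ∈ (ms.foldl (pvStepB n) st).2, x < 512) ∧
    (ms.foldl (pvStepB n) st).2.length + unseenN (ms.foldl (pvStepB n) st).1
      = st.2.length + unseenN st.1 := by
  intro ms
  induction ms with
  | nil => exact fun _ st h1 h2 => ⟨h1, h2, rfl⟩
  | cons m ms' ih =>
    intro hms st h1 h2
    obtain ⟨g1, g2, g3⟩ := stepB_props hn st (hms m (List.mem_cons_self ..)) h1 h2
    obtain ⟨r1, r2, r3⟩ := ih (fun q hq => hms q (List.mem_cons_of_mem _ hq)) _ g1 g2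
    exact ⟨r1, r2, by simp only [List.foldl_cons]; omega⟩

lemma expand_props {n : Nat} (hn : n < 512) (st : Nat × List Nat)
    (h1 : st.1 < 2 ^ 512) (h2 : ∀ x ∈ st.2, x < 512) :
    (pvExpand st n).1 < 2 ^ 512 ∧ (∀ x ∈ (pvExpand st n).2, x < 512) ∧
    (pvExpand st n).2.length + unseenN (pvExpand st n).1 = st.2.length + unseenN st.1 := by
  unfold pvExpand
  exact maskFold_props hn pvMasks (by decide) st h1 h2

lemma expandL_props : ∀ (F : List Nat), (∀ x ∈ F, x < 512) → ∀ (st : Nat × List Nat),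
    st.1 < 2 ^ 512 → (∀ x ∈ st.2, x < 512) →
    (F.foldl pvExpand st).1 < 2 ^ 512 ∧ (∀ x ∈ (F.foldl pvExpand st).2, x < 512) ∧
    (F.foldl pvExpand st).2.length + unseenN (F.foldl pvExpand st).1
      = st.2.length + unseenN st.1 := by
  intro F
  induction F with
  | nil => exact fun _ st h1 h2 => ⟨h1, h2, rfl⟩
  | cons x F' ih =>
    intro hF st h1 h2
    obtain ⟨g1, g2, g3⟩ := expand_props (hF x (List.mem_cons_self ..)) st h1 h2
    obtain ⟨r1, r2, r3⟩ := ih (fun q hq => hF q (List.mem_cons_of_mem _ hq)) _ g1 g2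
    exact ⟨r1, r2, by simp only [List.foldl_cons]; omega⟩

lemma hmp_all {n : Nat} (hn : n < 512) : ∀ p ∈ pvMP, p.2 < 512 ∧
    PySem.Int.ofCharsBase? (pvFlip p.1 (pvBin9 (n : Int))) 2 = some ((n ^^^ p.2 : Nat) : Int) :=
  fun _ hp => ⟨masks_lt hp, pipeline hn hp⟩

lemma cast_target {n : Nat} : (((n : Nat) : Int) = 0 ∨ ((n : Nat) : Int) = 511) ↔ (n = 0 ∨ n = 511) := by
  omega

-- one dequeue of a non-target head, stated on a level-shaped queue
lemma bfsLoop_step {x : Nat} (hx : x < 512) (hxt : ¬(x = 0 ∨ x = 511))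
    (fA : Nat) (seen : Nat) (N F' : List Nat) (d : Nat) :
    pvBfsLoop (fA + 1) (bitsL seen) ((x :: F').map (pairD d) ++ N.map (pairD (d+1)))
      = pvBfsLoop fA (bitsL (pvExpand (seen, N) x).1)
          (F'.map (pairD d) ++ (pvExpand (seen, N) x).2.map (pairD (d+1))) := by
  have hg : ¬(((x : Nat) : Int) = 0 ∨ ((x : Nat) : Int) = 511) := by
    rw [cast_target]; exact hxt
  simp only [List.map_cons, List.cons_append, pvBfsLoop, pairD]
  rw [if_neg hg]
  have hfold := foldAB pvMP d hx (hmp_all hx) seen N (F'.map (pairD d))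
  rw [pvMP_fst, pvMP_snd] at hfold
  rw [show pvMasks.foldl (pvStepB x) (seen, N) = pvExpand (seen, N) x from rfl] at hfold
  exact congrArg (fun st => pvBfsLoop fA st.1 st.2) hfold

-- A's loop returns the current depth as soon as the current stratum holds a target
lemma bfsLoop_hit : ∀ (F : List Nat) (seen : Nat) (N : List Nat) (d fA : Nat),
    (∀ x ∈ F, x < 512) → F.length ≤ fA →
    (∃ x ∈ F, x = 0 ∨ x = 511) →
    pvBfsLoop fA (bitsL seen) (F.map (pairD d) ++ N.map (pairD (d+1))) = (d : Int) := by
  intro F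
  induction F with
  | nil => simp
  | cons x F' ih =>
    intro seen N d fA hF hfA hex
    obtain ⟨fA', rfl⟩ : ∃ f, fA = f + 1 := by
      cases fA
      · simp at hfA
      · exact ⟨_, rfl⟩
    by_cases hxt : x = 0 ∨ x = 511
    · have : (((x : Nat) : Int) = 0 ∨ ((x : Nat) : Int) = 511) := cast_target.mpr hxt
      simp only [List.map_cons, List.cons_append, pvBfsLoop, pairD]
      rw [if_pos this]
    · rw [bfsLoop_step (hF x (List.mem_cons_self ..)) hxt]
      apply ih
      · exact fun q hq => hF q (List.mem_cons_of_mem _ hq)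
      · simpa using hfA
      · rcases hex with ⟨y, hy, hyt⟩
        rcases List.mem_cons.mp hy with rfl | hy'
        · exact absurd hyt hxt
        · exact ⟨y, hy', hyt⟩

-- A's loop consumes one whole target-free stratum exactly as one level expansion
lemma bfsLoop_level : ∀ (F : List Nat), (∀ x ∈ F, x < 512) → (∀ x ∈ F, ¬(x = 0 ∨ x = 511)) →
    ∀ (g : Nat) (seen : Nat) (N : List Nat) (d : Nat),
    pvBfsLoop (F.length + g) (bitsL seen) (F.map (pairD d) ++ N.map (pairD (d+1)))
      = pvBfsLoop g (bitsL (F.foldl pvExpand (seen, N)).1)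
          ((F.foldl pvExpand (seen, N)).2.map (pairD (d+1))) := by
  intro F
  induction F with
  | nil => intro _ _ g seen N d; simp
  | cons x F' ih =>
    intro hF htar g seen N d
    have hlen : (x :: F').length + g = (F'.length + g) + 1 := by simp; omega
    rw [hlen, bfsLoop_step (hF x (List.mem_cons_self ..)) (htar x (List.mem_cons_self ..))]
    rw [ih (fun q hq => hF q (List.mem_cons_of_mem _ hq))
        (fun q hq => htar q (List.mem_cons_of_mem _ hq)) g _ _ d]
    rfl

lemma any_target_iff (F : List Nat) :
    (F.any (fun n => n == 0 || n == 511) = true) ↔ (∃ x ∈ F, x = 0 ∨ x = 511) := by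
  simp

-- the main lockstep lemma: A at a level boundary = the Nat-level BFS
lemma mainLoop : ∀ (fB : Nat) (seen : Nat) (F : List Nat) (d fA : Nat),
    (∀ x ∈ F, x < 512) → seen < 2 ^ 512 →
    F.length + unseenN seen ≤ fA → (F ≠ [] → 1 + unseenN seen ≤ fB) →
    pvBfsLoop fA (bitsL seen) (F.map (pairD d)) = pvAltLoop fB seen F d := by
  intro fB
  induction fB with
  | zero =>
    intro seen F d fA hF hseen hfA hfB
    cases F with
    | nil => simp [pvAltLoop, pvBfsLoop]
    | cons x F' => exact absurd (hfB (by simp)) (by omega)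
  | succ f ih =>
    intro seen F d fA hF hseen hfA hfB
    cases F with
    | nil => simp [pvAltLoop, pvBfsLoop]
    | cons x F' =>
      by_cases hany : ((x :: F').any (fun n => n == 0 || n == 511) = true)
      · rw [show pvAltLoop (f+1) seen (x :: F') d = (d : Int) by
          simp only [pvAltLoop]; rw [if_pos hany]]
        have hex := (any_target_iff _).mp hany
        have := bfsLoop_hit (x :: F') seen [] d fA hF (by omega) hex
        simpa using this
      · have htar : ∀ q ∈ (x :: F'), ¬(q = 0 ∨ q = 511) := by
          intro q hq hqt
          exact hany ((any_target_iff _).mpr ⟨q, hq, hqt⟩)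
        have hlenle : (x :: F').length ≤ fA := by omega
        obtain ⟨g, hg⟩ : ∃ g, fA = (x :: F').length + g :=
          ⟨fA - (x :: F').length, by omega⟩
        have hlev := bfsLoop_level (x :: F') hF htar g seen [] d
        simp only [List.map_nil, List.append_nil] at hlev
        obtain ⟨p1, p2, p3⟩ := expandL_props (x :: F') hF (seen, []) hseen (by simp)
        have hme : ((x :: F').foldl pvExpand (seen, [])).2.length
            + unseenN ((x :: F').foldl pvExpand (seen, [])).1 = unseenN seen := by
          simpa using p3
        rw [hg, hlev]
        rw [show pvAltLoop (f+1) seen (x :: F') d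
            = pvAltLoop f ((x :: F').foldl pvExpand (seen, [])).1
                ((x :: F').foldl pvExpand (seen, [])).2 (d+1) by
          simp only [pvAltLoop]; rw [if_neg hany]]
        refine ih _ _ (d+1) g p2 p1 ?_ ?_
        · rw [hme]
          omega
        · intro hne
          have hfB2 : 1 + unseenN seen ≤ f + 1 := hfB (by simp)
          have hlen1 : 0 < ((x :: F').foldl pvExpand (seen, [])).2.length :=
            List.length_pos_of_ne_nil hne
          omega

-- ---- from pvAltLoop to B's subset scan, via XOR-translation to the start-0 run ----
-- every BFS run is the XOR-translate (by its start) of the single run from state 0,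
-- so only that one run is evaluated; its level lists are the literal pvLIT below.

def pvE (p : Nat × List Nat) : Nat × List Nat := p.2.foldl pvExpand (p.1, [])

def pvLevels : Nat → Nat × List Nat → List (List Nat)
  | 0, _ => []
  | f + 1, p => if p.2 = [] then [] else p.2 :: pvLevels f (pvE p)

def pvSearch : List (List Nat) → Nat → Int
  | [], _ => -1
  | L :: r, d => if L.any (fun x => x == 0 || x == 511) then (d : Int) else pvSearch r (d + 1)

def pvSearchT (n : Nat) : List (List Nat) → Nat → Int
  | [], _ => -1
  | L :: r, d => if L.any (fun x => x == n || x == n ^^^ 511) then (d : Int) else pvSearchT n r (d + 1)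

def pvRelT (n s t : Nat) : Prop := ∀ y, y < 512 → t.testBit (n ^^^ y) = s.testBit y

def pvLIT : List (List Nat) := [
  [0],
  [448, 56, 7, 292, 146, 73, 273, 84],
  [504, 455, 228, 338, 393, 209, 404, 63, 284, 170, 113, 297, 108, 291, 149, 78, 278, 83, 438, 365, 53, 368, 219, 387, 198, 344, 29, 325],
  [511, 220, 362, 433, 233, 428, 227, 341, 398, 214, 403, 118, 173, 501, 176, 283, 67, 262, 152, 477, 133, 302, 107, 13, 328, 443, 254, 352, 37, 381, 50, 375, 388, 193, 351, 26, 322, 167, 482, 124, 313, 97, 458, 143, 471, 268],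
  [238, 427, 461, 136, 123, 318, 160, 485, 189, 498, 183, 68, 257, 159, 474, 130, 359, 34, 444, 249, 417, 10, 335, 23, 204, 378, 89, 495, 308, 102, 464, 267, 243, 40, 414],
  [186, 409, 47, 244, 422, 16, 203, 307, 488, 94]]

lemma pvLevels_succ (f : Nat) (p : Nat × List Nat) :
    pvLevels (f + 1) p = if p.2 = [] then [] else p.2 :: pvLevels f (pvE p) := rfl

lemma pvSearch_cons (L : List Nat) (r : List (List Nat)) (d : Nat) :
    pvSearch (L :: r) d = if L.any (fun x => x == 0 || x == 511) then (d : Int) else pvSearch r (d + 1) := rfl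

lemma pvSearchT_cons (n : Nat) (L : List Nat) (r : List (List Nat)) (d : Nat) :
    pvSearchT n (L :: r) d = if L.any (fun x => x == n || x == n ^^^ 511) then (d : Int) else pvSearchT n r (d + 1) := rfl

lemma xor_cancel_left' (n a : Nat) : n ^^^ (n ^^^ a) = a := by
  rw [← Nat.xor_assoc, Nat.xor_self, Nat.zero_xor]

lemma xorc (n a b : Nat) : (n ^^^ a = b) ↔ (a = n ^^^ b) :=
  ⟨fun h => by rw [← h, xor_cancel_left'], fun h => by rw [h, xor_cancel_left']⟩

-- pvAltLoop is exactly a search through the level lists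
lemma altLoop_search : ∀ (f : Nat) (seen : Nat) (F : List Nat) (d : Nat),
    pvAltLoop f seen F d = pvSearch (pvLevels f (seen, F)) d := by
  intro f
  induction f with
  | zero =>
    intro seen F d
    cases F <;> rfl
  | succ f ih =>
    intro seen F d
    cases F with
    | nil => rfl
    | cons x F' =>
      rw [pvLevels_succ, if_neg (by simp), pvSearch_cons]
      unfold pvAltLoop
      split
      · rfl
      · exact ih _ _ _

-- one mask step commutes with the XOR translation
lemma stepB_trans {n x m s t : Nat} (hx : x < 512) (hm : m < 512) (hrel : pvRelT n s t)
    (L : List Nat) :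
    (pvStepB (n ^^^ x) (t, L.map (fun y => n ^^^ y)) m).2
        = (pvStepB x (s, L) m).2.map (fun y => n ^^^ y) ∧
    pvRelT n (pvStepB x (s, L) m).1 (pvStepB (n ^^^ x) (t, L.map (fun y => n ^^^ y)) m).1 := by
  have hxm : x ^^^ m < 512 := xor_lt hx hm
  have key : (n ^^^ x) ^^^ m = n ^^^ (x ^^^ m) := Nat.xor_assoc n x m
  have htest : ((t >>> (n ^^^ (x ^^^ m))) % 2 = 0) ↔ ((s >>> (x ^^^ m)) % 2 = 0) := by
    rw [testBit_of_mod, testBit_of_mod, hrel _ hxm]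
  unfold pvStepB
  rw [key]
  by_cases hc : (s >>> (x ^^^ m)) % 2 = 0
  · rw [if_pos hc, if_pos (htest.mpr hc)]
    refine ⟨by simp, ?_⟩
    intro y hy
    have hiff : (n ^^^ (x ^^^ m) = n ^^^ y) ↔ (x ^^^ m = y) := by
      rw [xorc, xor_cancel_left']
    simp only [Nat.testBit_or, Nat.one_shiftLeft, Nat.testBit_two_pow, hrel y hy]
    congr 1
    exact decide_eq_decide.mpr hiff
  · rw [if_neg hc, if_neg (fun h => hc (htest.mp h))]
    exact ⟨rfl, hrel⟩

-- the whole mask fold commutes with the translation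
lemma maskFold_trans {n x : Nat} (hx : x < 512) :
    ∀ (ms : List Nat), (∀ m ∈ ms, m < 512) → ∀ (s t : Nat) (L : List Nat), pvRelT n s t →
    (ms.foldl (pvStepB (n ^^^ x)) (t, L.map (fun y => n ^^^ y))).2
        = (ms.foldl (pvStepB x) (s, L)).2.map (fun y => n ^^^ y) ∧
    pvRelT n (ms.foldl (pvStepB x) (s, L)).1 (ms.foldl (pvStepB (n ^^^ x)) (t, L.map (fun y => n ^^^ y))).1 := by
  intro ms
  induction ms with
  | nil => exact fun _ s t L hrel => ⟨rfl, hrel⟩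
  | cons m ms' ih =>
    intro hms s t L hrel
    obtain ⟨h2, h1⟩ := stepB_trans hx (hms m (List.mem_cons_self ..)) hrel L
    simp only [List.foldl_cons]
    have hpair : pvStepB (n ^^^ x) (t, L.map (fun y => n ^^^ y)) m
        = ((pvStepB (n ^^^ x) (t, L.map (fun y => n ^^^ y)) m).1,
           ((pvStepB x (s, L) m).2).map (fun y => n ^^^ y)) := by
      rw [← h2]
    rw [hpair]
    exact ih (fun q hq => hms q (List.mem_cons_of_mem _ hq)) _ _ _ h1

-- the frontier fold commutes with the translation
lemma efold_trans {n : Nat} :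
    ∀ (F : List Nat), (∀ q ∈ F, q < 512) → ∀ (s t : Nat) (L : List Nat), pvRelT n s t →
    ((F.map (fun y => n ^^^ y)).foldl pvExpand (t, L.map (fun y => n ^^^ y))).2
        = (F.foldl pvExpand (s, L)).2.map (fun y => n ^^^ y) ∧
    pvRelT n (F.foldl pvExpand (s, L)).1
        ((F.map (fun y => n ^^^ y)).foldl pvExpand (t, L.map (fun y => n ^^^ y))).1 := by
  intro F
  induction F with
  | nil => exact fun _ s t L hrel => ⟨rfl, hrel⟩
  | cons x F' ih =>
    intro hF s t L hrel
    simp only [List.map_cons, List.foldl_cons]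
    have hx : x < 512 := hF x (List.mem_cons_self ..)
    obtain ⟨h2, h1⟩ := maskFold_trans hx pvMasks (by decide) s t L hrel
    rw [show pvExpand (t, L.map (fun y => n ^^^ y)) (n ^^^ x)
        = pvMasks.foldl (pvStepB (n ^^^ x)) (t, L.map (fun y => n ^^^ y)) from rfl,
      show pvExpand (s, L) x = pvMasks.foldl (pvStepB x) (s, L) from rfl]
    have hpair : pvMasks.foldl (pvStepB (n ^^^ x)) (t, L.map (fun y => n ^^^ y))
        = ((pvMasks.foldl (pvStepB (n ^^^ x)) (t, L.map (fun y => n ^^^ y))).1,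
           ((pvMasks.foldl (pvStepB x) (s, L)).2).map (fun y => n ^^^ y)) := by
      rw [← h2]
    rw [hpair]
    exact ih (fun q hq => hF q (List.mem_cons_of_mem _ hq)) _ _ _ h1

-- frontier elements stay below 512 (no bound on the visited mask needed)
lemma maskFold_mem {x : Nat} (hx : x < 512) :
    ∀ (ms : List Nat), (∀ m ∈ ms, m < 512) → ∀ (st : Nat × List Nat),
    (∀ y ∈ st.2, y < 512) → ∀ y ∈ (ms.foldl (pvStepB x) st).2, y < 512 := by
  intro ms
  induction ms with
  | nil => exact fun _ st h => h
  | cons m ms' ih =>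
    intro hms st hst
    apply ih (fun q hq => hms q (List.mem_cons_of_mem _ hq))
    intro y hy
    unfold pvStepB at hy
    split at hy
    · rcases List.mem_append.mp hy with h | h
      · exact hst y h
      · simp at h
        have := xor_lt hx (hms m (List.mem_cons_self ..))
        omega
    · exact hst y hy

lemma efold_mem : ∀ (F : List Nat), (∀ q ∈ F, q < 512) → ∀ (st : Nat × List Nat),
    (∀ y ∈ st.2, y < 512) → ∀ y ∈ (F.foldl pvExpand st).2, y < 512 := by
  intro F
  induction F with
  | nil => exact fun _ st h => h
  | cons x F' ih =>
    intro hF st hst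
    apply ih (fun q hq => hF q (List.mem_cons_of_mem _ hq))
    exact maskFold_mem (hF x (List.mem_cons_self ..)) pvMasks (by decide) st hst

lemma levels_mem : ∀ (f : Nat) (p : Nat × List Nat), (∀ y ∈ p.2, y < 512) →
    ∀ L ∈ pvLevels f p, ∀ y ∈ L, y < 512 := by
  intro f
  induction f with
  | zero => intro p _ L hL; simp [pvLevels] at hL
  | succ f ih =>
    intro p hp L hL
    unfold pvLevels at hL
    split at hL
    · simp at hL
    · rcases List.mem_cons.mp hL with rfl | hL'
      · exact hp
      · exact ih (pvE p) (efold_mem p.2 hp (p.1, []) (by simp)) L hL'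

-- the level lists of a translated run are the translated level lists
lemma levels_trans {n : Nat} : ∀ (f : Nat) (s t : Nat) (F : List Nat),
    (∀ q ∈ F, q < 512) → pvRelT n s t →
    pvLevels f (t, F.map (fun y => n ^^^ y)) = (pvLevels f (s, F)).map (List.map (fun y => n ^^^ y)) := by
  intro f
  induction f with
  | zero => intro s t F _ _; rfl
  | succ f ih =>
    intro s t F hF hrel
    unfold pvLevels
    by_cases hFe : F = []
    · subst hFe; simp
    · rw [if_neg (by simpa using hFe), if_neg hFe]
      simp only [List.map_cons]
      congr 1
      obtain ⟨h2, h1⟩ := efold_trans F hF s t [] hrel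
      have h2' : (pvE (t, F.map (fun y => n ^^^ y))).2 = ((pvE (s, F)).2).map (fun y => n ^^^ y) := h2
      have h1' : pvRelT n (pvE (s, F)).1 (pvE (t, F.map (fun y => n ^^^ y))).1 := h1
      have hpair : pvE (t, F.map (fun y => n ^^^ y))
          = ((pvE (t, F.map (fun y => n ^^^ y))).1,
             ((pvE (s, F)).2).map (fun y => n ^^^ y)) := by
        rw [← h2']
      rw [hpair]
      exact ih _ _ _ (efold_mem F hF (s, []) (by simp)) h1'

-- searching translated levels for {0, 511} = searching the originals for {n, n ^^^ 511}
lemma search_trans {n : Nat} (hn : n < 512) :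
    ∀ (Ls : List (List Nat)), (∀ L ∈ Ls, ∀ y ∈ L, y < 512) → ∀ (d : Nat),
    pvSearch (Ls.map (List.map (fun y => n ^^^ y))) d = pvSearchT n Ls d := by
  intro Ls
  induction Ls with
  | nil => intro _ d; rfl
  | cons L r ih =>
    intro hLs d
    simp only [List.map_cons]
    rw [pvSearch_cons, pvSearchT_cons]
    have hcond : ((L.map (fun y => n ^^^ y)).any (fun x => x == 0 || x == 511))
        = (L.any (fun x => x == n || x == n ^^^ 511)) := by
      rw [Bool.eq_iff_iff]
      simp only [List.any_eq_true, List.mem_map, Bool.or_eq_true, beq_iff_eq]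
      constructor
      · rintro ⟨_, ⟨x, hx, rfl⟩, h⟩
        refine ⟨x, hx, ?_⟩
        rcases h with h | h
        · left
          have := (xorc n x 0).mp h
          rwa [Nat.xor_zero] at this
        · right
          exact (xorc n x 511).mp h
      · rintro ⟨x, hx, h⟩
        refine ⟨n ^^^ x, ⟨x, hx, rfl⟩, ?_⟩
        rcases h with h | h
        · left
          rw [h, Nat.xor_self]
        · right
          rw [h, xor_cancel_left']
    rw [hcond]
    split
    · rfl
    · exact ih (fun q hq => hLs q (List.mem_cons_of_mem _ hq)) _

-- the one evaluated BFS: the level lists from state 0 are the literal pvLIT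
set_option maxHeartbeats 1000000 in
lemma levels_lit : pvLevels 1000 (1, [0]) = pvLIT := by decide

-- every start's run is the translate of the run from 0
lemma trans_main {n : Nat} (hn : n < 512) :
    pvAltLoop 1000 (1 <<< n) [n] 0 = pvSearchT n pvLIT 0 := by
  rw [altLoop_search]
  have hrel : pvRelT n 1 (1 <<< n) := by
    intro y hy
    rw [Nat.one_shiftLeft, Nat.testBit_two_pow,
      show (1 : Nat) = 2 ^ 0 from rfl, Nat.testBit_two_pow]
    have hiff : (n = n ^^^ y) ↔ (0 = y) := by
      rw [eq_comm, xorc, Nat.xor_self, eq_comm]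
    exact decide_eq_decide.mpr hiff
  have hlev := levels_trans 1000 1 (1 <<< n) [0] (by intro q hq; simp at hq; omega) hrel
  rw [show ([0] : List Nat).map (fun y => n ^^^ y) = [n] by simp] at hlev
  rw [hlev, search_trans hn _ (levels_mem 1000 (1, [0]) (by simp)) 0, levels_lit]

-- the translated search through pvLIT agrees with B's subset scan at every start
set_option maxHeartbeats 4000000 in
lemma final_all : (List.range 512).all (fun n => pvSearchT n pvLIT 0 == pvScan n) = true := by
  decide

lemma bfs_eq_scan {n : Nat} (hn : n < 512) : pvAltLoop 1000 (1 <<< n) [n] 0 = pvScan n := by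
  rw [trans_main hn]
  exact beq_iff_eq.mp (List.all_eq_true.mp final_all n (List.mem_range.mpr hn))

-- ===== VERDICT (by name: the statement is the Claim_ definition above) =====
theorem bfs_spec : Claim_equal_bfs := by
  intro numbers _ hpre
  obtain ⟨hs, h0, h1⟩ := hpre
  unfold Spec_bfs bfs bfs_alt
  cases h : PySem.Int.ofStrBase? (PySem.Str.join "" numbers) 2 with
  | none => simp [h] at hs
  | some v =>
    rw [h] at h0 h1
    simp only [Option.getD_some] at h0 h1
    have hneg : ¬ (v < 0 ∨ 511 < v) := by omega
    dsimp only
    rw [if_neg hneg, if_neg hneg]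
    have hv512 : v.toNat < 512 := by omega
    have hvz : ((v.toNat : Nat) : Int) = v := Int.toNat_of_nonneg h0
    have hinit : (List.replicate 512 false).set v.toNat true = bitsL (1 <<< v.toNat) := by
      rw [replicate_eq_bitsL, set_bitsL 0 hv512, Nat.zero_or]
    have hq : [((v : Int), (0 : Int))] = [v.toNat].map (pairD 0) := by
      simp [pairD, hvz]
    rw [hinit, hq]
    have hu : unseenN (1 <<< v.toNat) = 511 := by
      have := unseenN_or hv512 (Nat.zero_testBit v.toNat)
      rw [Nat.zero_or] at this
      rw [unseenN_zero] at this
      omega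
    rw [mainLoop 1000 (1 <<< v.toNat) [v.toNat] 0 1000
        (by intro x hx; simp at hx; omega)
        (by rw [Nat.one_shiftLeft]; exact Nat.pow_lt_pow_right (by norm_num) hv512)
        (by simp [hu]) (by intro _; simp [hu])]
    exact bfs_eq_scan hv512
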